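-- pv_equiv track=rewrite | github.com/daniel-reich/turbo-robot | M3oq3s8T7Nz7piBvc_3.py | even_odd_string
-- ===== SOURCE A (Python) =====
-- def even_odd_string(txt):
--     even,odd='',''
--     for i,j in enumerate(txt):
--         if i%2==0:
--           even+=j
--         if i%2!=0:
--             odd+=j
--     return '{} {}'.format(even,odd)
-- ===== SOURCE B (Python) =====
-- def even_odd_string(txt):
--     return '{} {}'.format(txt[::2], txt[1::2])
-- ===== Notes on version B (the rewrite author's own statement) =====
-- stated objective: idiomatic
-- what changed: Replaces the index-parity loop with two per-character string accumulators by two strided slices txt[::2] and txt[1::2] joined with a space.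
import Mathlib
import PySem

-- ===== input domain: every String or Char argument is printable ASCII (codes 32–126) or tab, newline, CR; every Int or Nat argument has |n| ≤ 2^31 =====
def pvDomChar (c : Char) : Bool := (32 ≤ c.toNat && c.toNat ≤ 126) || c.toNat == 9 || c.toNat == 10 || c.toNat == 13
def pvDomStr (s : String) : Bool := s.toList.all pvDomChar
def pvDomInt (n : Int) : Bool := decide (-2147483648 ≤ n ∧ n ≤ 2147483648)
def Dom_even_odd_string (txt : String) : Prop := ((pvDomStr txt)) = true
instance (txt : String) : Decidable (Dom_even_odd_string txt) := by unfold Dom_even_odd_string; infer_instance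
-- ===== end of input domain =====

-- B replaces A's index-parity loop (two growing accumulators) by two strided slices
-- txt[::2] and txt[1::2] joined with a space (more idiomatic).


-- ===== PORT A =====
-- the loop body of A: the two sequential 'if's on i % 2, growing even / odd
def pvStepA (acc : List Char × List Char) (p : Int × Char) : List Char × List Char :=
  let acc := if PySem.Int.mod p.1 2 == 0 then (acc.1 ++ [p.2], acc.2) else acc
  if PySem.Int.mod p.1 2 != 0 then (acc.1, acc.2 ++ [p.2]) else acc

-- literal transliteration: fold over enumerate(txt) with (even, odd) accumulators
-- (kept as code-point lists; '{} {}'.format(even, odd) is even ++ ' ' ++ odd)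
def even_odd_string (txt : String) : String :=
  let st := (PySem.List.enumerate txt.toList).foldl pvStepA ([], [])
  String.ofList (st.1 ++ ' ' :: st.2)

-- ===== PORT B =====
-- literal transliteration of Source B: even = txt[::2], odd = txt[1::2], then 'even odd'.
-- slice? with literal step 2 never returns none (only step 0 does); getD [] totalizes.
def even_odd_string_alt (txt : String) : String :=
  let ev := (PySem.Chars.slice? txt.toList none none 2).getD []
  let od := (PySem.Chars.slice? txt.toList (some 1) none 2).getD []
  String.ofList (ev ++ ' ' :: od)

-- ===== PRECONDITION & SPEC =====
def Spec_even_odd_string (txt : String) (out : String) : Prop := out = even_odd_string_alt txt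
instance (txt : String) (out : String) : Decidable (Spec_even_odd_string txt out) := by unfold Spec_even_odd_string; infer_instance

-- ===== CLAIM (what is proved, stated in full; the proofs are below) =====
def Claim_equal_even_odd_string : Prop := ∀ (txt : String), Dom_even_odd_string txt → Spec_even_odd_string txt (even_odd_string txt)

-- ===== LEMMAS AND PROOFS =====

/-- Every other element, starting with the first. -/
def pvEveryOther {α : Type} : List α → List α
  | [] => []
  | [x] => [x]
  | x :: _ :: xs => x :: pvEveryOther xs

theorem pvEveryOther_cons {α : Type} (x : α) (xs : List α) :
    pvEveryOther (x :: xs) = x :: pvEveryOther xs.tail := by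
  cases xs <;> simp [pvEveryOther]

theorem pv_filterMap_range_even {α : Type} (xs : List α) :
    (List.range ((xs.length + 1) / 2)).filterMap (fun k => xs[2 * k]?) = pvEveryOther xs := by
  induction xs using pvEveryOther.induct with
  | case1 => simp [pvEveryOther]
  | case2 x => simp [pvEveryOther]
  | case3 x y rest ih =>
    have hc : ((x :: y :: rest).length + 1) / 2 = (rest.length + 1) / 2 + 1 := by
      simp; omega
    have hf : (fun k => (x :: y :: rest)[2 * (k + 1)]?) = (fun k => rest[2 * k]?) := by
      funext k
      have h2 : 2 * (k + 1) = 2 * k + 1 + 1 := by ring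
      rw [h2]
      simp
    rw [hc, List.range_succ_eq_map, List.filterMap_cons, List.filterMap_map]
    simp only [Function.comp_def, hf]
    simp [pvEveryOther, ih]

theorem pv_slice2_even {α : Type} (xs : List α) :
    PySem.List.slice? xs none none 2 = some (pvEveryOther xs) := by
  rw [PySem.List.slice?, PySem.List.sliceIndices]
  simp only
  norm_num
  have hc : (if 0 < xs.length then (((xs.length : Int) + 2 - 1) / 2).toNat else 0)
      = (xs.length + 1) / 2 := by split <;> omega
  have hf : (fun k : Nat => xs[((2 : Int) * (k : Int)).toNat]?) = (fun k => xs[2 * k]?) := by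
    funext k
    have h2 : ((2 : Int) * (k : Int)).toNat = 2 * k := by omega
    rw [h2]
  rw [hc, hf, pv_filterMap_range_even]

theorem pv_slice2_odd {α : Type} (xs : List α) :
    PySem.List.slice? xs (some 1) none 2 = some (pvEveryOther xs.tail) := by
  cases xs with
  | nil => rw [PySem.List.slice?, PySem.List.sliceIndices]; simp [pvEveryOther]
  | cons x rest =>
    rw [PySem.List.slice?, PySem.List.sliceIndices]
    simp only
    norm_num
    have hc : (if 0 < rest.length then (((rest.length : Int) + 2 - 1) / 2).toNat else 0)
        = (rest.length + 1) / 2 := by split <;> omega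
    have hf : (fun k : Nat => (x :: rest)[((1 : Int) + 2 * (k : Int)).toNat]?)
        = (fun k => rest[2 * k]?) := by
      funext k
      have h2 : ((1 : Int) + 2 * (k : Int)).toNat = 2 * k + 1 := by omega
      rw [h2]
      simp
    rw [hc, hf, pv_filterMap_range_even]

theorem pvStepA_even (acc : List Char × List Char) (p : Int × Char) (h : p.1 % 2 = 0) :
    pvStepA acc p = (acc.1 ++ [p.2], acc.2) := by
  simp [pvStepA, PySem.Int.mod, Int.fmod_eq_emod, h]

theorem pvStepA_odd (acc : List Char × List Char) (p : Int × Char) (h : p.1 % 2 = 1) :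
    pvStepA acc p = (acc.1, acc.2 ++ [p.2]) := by
  simp [pvStepA, PySem.Int.mod, Int.fmod_eq_emod, h]

theorem pv_fold_eo (xs : List Char) (i : Int) (ev od : List Char) :
    (PySem.List.enumerate xs i).foldl pvStepA (ev, od)
    = if i % 2 = 0 then (ev ++ pvEveryOther xs, od ++ pvEveryOther xs.tail)
      else (ev ++ pvEveryOther xs.tail, od ++ pvEveryOther xs) := by
  induction xs generalizing i ev od with
  | nil => simp [PySem.List.enumerate, pvEveryOther]
  | cons x rest ih =>
    rw [PySem.List.enumerate_cons, List.foldl_cons]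
    rcases Int.emod_two_eq i with h | h
    · have hnext : (i + 1) % 2 = 1 := by omega
      rw [pvStepA_even _ _ h, ih, hnext]
      simp [pvEveryOther_cons x rest, h]
    · have hnext : (i + 1) % 2 = 0 := by omega
      rw [pvStepA_odd _ _ h, ih, hnext]
      simp [pvEveryOther_cons x rest, h]

-- ===== VERDICT (by name: the statement is the Claim_ definition above) =====
theorem even_odd_string_spec : Claim_equal_even_odd_string := by
  intro txt _
  unfold Spec_even_odd_string even_odd_string even_odd_string_alt
  simp only [PySem.Chars.slice?_eq_listSlice?, pv_slice2_even, pv_slice2_odd, Option.getD_some]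
  rw [pv_fold_eo txt.toList 0 [] []]
  norm_num
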